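-- pv_equiv track=rewrite | github.com/BiomedSciAI/fuse-med-ml | fuse_examples/classification/multimodality/mg_dataset.py | tabular_feature_mg
-- ===== SOURCE A (Python) =====
-- def tabular_feature_mg(data):
--     features_dict = {}
--     features_dict['icd9_feat'] = [x for x in data if x.startswith('dx_')]
--     features_dict['labs_feat'] = [x for x in data if x.startswith('labs')]
--     features_dict['hrt_feat'] = [x for x in data if x.startswith('HRT')]
--     features_dict['outcome_feat'] = [x for x in data if x.startswith('outcome')]
--     features_dict['fam_feats'] = [x for x in data if x.startswith('family')]
--     features_dict['biopsy_feat'] = ['prev_biopsy_result_max', 'past_biopsy_proc_ind', 'past_biopsy_proc_cnt']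
--     features_dict['smoking_feat'] = [x for x in data if x.startswith('smoking')]
--     features_dict['radio_feat'] = [x for x in data if 'birads' in x] + [x for x in data if 'breast_density' in x] +\
--                     [x for x in data if 'breast_MRI' in x]
--     features_dict['demo_feat'] = [ 'age', 'race', 'religion', 'bmi_max', 'bmi_last', 'weight_max', 'weight_last',
--                  'osteoporosis_ind', 'bmi_current', 'diabetes_ind']#, 'calc_bmi_current', 'calc_likelihood_obesity']
--     features_dict['sympt_feat'] = [  'pain_cnt', 'nipple_retraction_ind_past',
--                   'lump_by_dr_ind_past', 'nipple_retraction_ind_current',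
--                   'infection_current_ind', 'lump_by_dr_cnt', 'nipple_retraction_cnt',
--                    'lump_by_dr_ind_current',  'breast_disorder_ind',
--                   'breast_disorder_current_ind', 'nipple_allocation_ind_current', 'nipple_allocation_cnt',
--                  'nipple_allocation_ind_past',  'complaint_ind_current', 'complaint_ind_past',
--                  'pain_ind_past', 'pain_ind_current', 'infection_current_ind_last']
--     features_dict['meds_feat'] = [ 'oral_contraceptives_ind_current', 'progesterons_ind', 'oral_contraceptives_ind_past']
--     features_dict['gynec_feat'] = ['has_breastfed_ind', 'children_ind', 'children_cnt', 'age_last_menstruation', 'menopause_ind',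
--                  'age_first_childbirth', 'pregnancies_cnt', 'pregnancies_ind', 'age_first_menstruation',
--                   'menstruation_years', 'menopause_dx_ind', 'menarche_to_ftp_years']
--     features_dict['prev_finding_feat'] = ['prev_high_risk_ind', 'cancer_hist_any_ind', 'prev_benign_cnt', 'prev_benign_ind',
--                         'prev_high_risk_cnt']
--     features_dict['genetic_feat'] = ['genetic_consult_ind']
--     features_dict['images'] = ['LCC_micro','RCC_micro','LMLO_micro','RMLO_micro',
--      'LCC_pred_classA','LCC_pred_classB', 'LCC_pred_classC', 'LCC_pred_classD', 'LCC_pred_classE',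
--      'RCC_pred_classA', 'RCC_pred_classB','RCC_pred_classC', 'RCC_pred_classD','RCC_pred_classE',
--      'LMLO_pred_classA', 'LMLO_pred_classB', 'LMLO_pred_classC', 'LMLO_pred_classD', 'LMLO_pred_classE',
--      'RMLO_pred_classA', 'RMLO_pred_classB', 'RMLO_pred_classC', 'RMLO_pred_classD', 'RMLO_pred_classE',
--      'LCC_findings_size', 'RCC_findings_size', 'LMLO_findings_size', 'RMLO_findings_size',
--      'LCC_findings_x_max', 'RCC_findings_x_max', 'LMLO_findings_x_max', 'RMLO_findings_x_max',
--      'LCC_findings_y_max', 'RCC_findings_y_max', 'LMLO_findings_y_max', 'RMLO_findings_y_max',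
--      'Calcification', 'Breast Assymetry', 'Tumor', 'Architectural Distortion', 'Axillary lymphadenopathy',
--              'spiculated_lesions_report', 'architectural_distortion_report', 'suspicious_calcifications_report']
--     features_dict['dicom'] = ['DistanceSourceToPatient_AVG_CC', 'DistanceSourceToDetector_AVG_CC',
--            'XRayTubeCurrent_AVG_CC', 'CompressionForce_AVG_CC',
--            'ExposureTime_AVG_CC', 'KVP_AVG_CC', 'BodyPartThickness_AVG_CC',
--            'RelativeXRayExposure_AVG_CC', 'ExposureInuAs_AVG_CC',
--            'DistanceSourceToPatient_AVG_MLO', 'DistanceSourceToDetector_AVG_MLO',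
--            'XRayTubeCurrent_AVG_MLO', 'CompressionForce_AVG_MLO',
--            'ExposureTime_AVG_MLO', 'KVP_AVG_MLO', 'BodyPartThickness_AVG_MLO',
--            'RelativeXRayExposure_AVG_MLO', 'ExposureInuAs_AVG_MLO']
--
--     return features_dict
-- ===== SOURCE B (Python) =====
-- def tabular_feature_mg(data):
--     # One bucketing pass over data (independent ifs), then assemble the dict
--     # together with the hardcoded constant lists.
--     icd9 = []
--     labs = []
--     hrt = []
--     outcome = []
--     fam = []
--     smoking = []
--     birads_b = []
--     density_b = []
--     mri_b = []
--     for x in data: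
--         if x.startswith('dx_'):
--             icd9.append(x)
--         if x.startswith('labs'):
--             labs.append(x)
--         if x.startswith('HRT'):
--             hrt.append(x)
--         if x.startswith('outcome'):
--             outcome.append(x)
--         if x.startswith('family'):
--             fam.append(x)
--         if x.startswith('smoking'):
--             smoking.append(x)
--         if 'birads' in x:
--             birads_b.append(x)
--         if 'breast_density' in x:
--             density_b.append(x)
--         if 'breast_MRI' in x:
--             mri_b.append(x)
--     return {
--         'icd9_feat': icd9,
--         'labs_feat': labs,
--         'hrt_feat': hrt,
--         'outcome_feat': outcome,
--         'fam_feats': fam,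
--         'biopsy_feat': ['prev_biopsy_result_max', 'past_biopsy_proc_ind', 'past_biopsy_proc_cnt'],
--         'smoking_feat': smoking,
--         'radio_feat': birads_b + density_b + mri_b,
--         'demo_feat': ['age', 'race', 'religion', 'bmi_max', 'bmi_last', 'weight_max', 'weight_last',
--                       'osteoporosis_ind', 'bmi_current', 'diabetes_ind'],
--         'sympt_feat': ['pain_cnt', 'nipple_retraction_ind_past',
--                        'lump_by_dr_ind_past', 'nipple_retraction_ind_current',
--                        'infection_current_ind', 'lump_by_dr_cnt', 'nipple_retraction_cnt',
--                        'lump_by_dr_ind_current', 'breast_disorder_ind',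
--                        'breast_disorder_current_ind', 'nipple_allocation_ind_current', 'nipple_allocation_cnt',
--                        'nipple_allocation_ind_past', 'complaint_ind_current', 'complaint_ind_past',
--                        'pain_ind_past', 'pain_ind_current', 'infection_current_ind_last'],
--         'meds_feat': ['oral_contraceptives_ind_current', 'progesterons_ind', 'oral_contraceptives_ind_past'],
--         'gynec_feat': ['has_breastfed_ind', 'children_ind', 'children_cnt', 'age_last_menstruation', 'menopause_ind',
--                        'age_first_childbirth', 'pregnancies_cnt', 'pregnancies_ind', 'age_first_menstruation',
--                        'menstruation_years', 'menopause_dx_ind', 'menarche_to_ftp_years'],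
--         'prev_finding_feat': ['prev_high_risk_ind', 'cancer_hist_any_ind', 'prev_benign_cnt', 'prev_benign_ind',
--                               'prev_high_risk_cnt'],
--         'genetic_feat': ['genetic_consult_ind'],
--         'images': ['LCC_micro', 'RCC_micro', 'LMLO_micro', 'RMLO_micro',
--                    'LCC_pred_classA', 'LCC_pred_classB', 'LCC_pred_classC', 'LCC_pred_classD', 'LCC_pred_classE',
--                    'RCC_pred_classA', 'RCC_pred_classB', 'RCC_pred_classC', 'RCC_pred_classD', 'RCC_pred_classE',
--                    'LMLO_pred_classA', 'LMLO_pred_classB', 'LMLO_pred_classC', 'LMLO_pred_classD', 'LMLO_pred_classE',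
--                    'RMLO_pred_classA', 'RMLO_pred_classB', 'RMLO_pred_classC', 'RMLO_pred_classD', 'RMLO_pred_classE',
--                    'LCC_findings_size', 'RCC_findings_size', 'LMLO_findings_size', 'RMLO_findings_size',
--                    'LCC_findings_x_max', 'RCC_findings_x_max', 'LMLO_findings_x_max', 'RMLO_findings_x_max',
--                    'LCC_findings_y_max', 'RCC_findings_y_max', 'LMLO_findings_y_max', 'RMLO_findings_y_max',
--                    'Calcification', 'Breast Assymetry', 'Tumor', 'Architectural Distortion', 'Axillary lymphadenopathy',
--                    'spiculated_lesions_report', 'architectural_distortion_report', 'suspicious_calcifications_report'],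
--         'dicom': ['DistanceSourceToPatient_AVG_CC', 'DistanceSourceToDetector_AVG_CC',
--                   'XRayTubeCurrent_AVG_CC', 'CompressionForce_AVG_CC',
--                   'ExposureTime_AVG_CC', 'KVP_AVG_CC', 'BodyPartThickness_AVG_CC',
--                   'RelativeXRayExposure_AVG_CC', 'ExposureInuAs_AVG_CC',
--                   'DistanceSourceToPatient_AVG_MLO', 'DistanceSourceToDetector_AVG_MLO',
--                   'XRayTubeCurrent_AVG_MLO', 'CompressionForce_AVG_MLO',
--                   'ExposureTime_AVG_MLO', 'KVP_AVG_MLO', 'BodyPartThickness_AVG_MLO',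
--                   'RelativeXRayExposure_AVG_MLO', 'ExposureInuAs_AVG_MLO'],
--     }
-- ===== Notes on version B (the rewrite author's own statement) =====
-- stated objective: alternative
-- what changed: Replaces A's nine separate comprehension scans over data with a single bucketing pass that tests each prefix/substring predicate with independent ifs and appends to the matching bucket, then assembles the dict with the unchanged constant lists.
import Mathlib
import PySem

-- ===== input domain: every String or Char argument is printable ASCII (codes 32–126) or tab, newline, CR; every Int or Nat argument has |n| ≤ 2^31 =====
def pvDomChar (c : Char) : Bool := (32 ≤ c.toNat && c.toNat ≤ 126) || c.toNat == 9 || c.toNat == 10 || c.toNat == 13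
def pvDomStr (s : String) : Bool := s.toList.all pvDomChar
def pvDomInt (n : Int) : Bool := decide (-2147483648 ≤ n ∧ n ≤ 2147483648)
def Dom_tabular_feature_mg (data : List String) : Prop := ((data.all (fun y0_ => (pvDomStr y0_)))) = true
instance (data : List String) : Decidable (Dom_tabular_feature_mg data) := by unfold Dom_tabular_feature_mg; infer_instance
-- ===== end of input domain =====

-- B replaces A's nine separate comprehension scans over data with one bucketing pass
-- (independent ifs appending to buckets); the hardcoded constant lists are shared verbatim.

def const_biopsy_feat : List String :=
  ["prev_biopsy_result_max", "past_biopsy_proc_ind", "past_biopsy_proc_cnt"]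

def const_demo_feat : List String :=
  ["age", "race", "religion", "bmi_max", "bmi_last", "weight_max", "weight_last", "osteoporosis_ind", "bmi_current", "diabetes_ind"]

def const_sympt_feat : List String :=
  ["pain_cnt", "nipple_retraction_ind_past", "lump_by_dr_ind_past", "nipple_retraction_ind_current", "infection_current_ind", "lump_by_dr_cnt", "nipple_retraction_cnt", "lump_by_dr_ind_current", "breast_disorder_ind", "breast_disorder_current_ind", "nipple_allocation_ind_current", "nipple_allocation_cnt", "nipple_allocation_ind_past", "complaint_ind_current", "complaint_ind_past", "pain_ind_past", "pain_ind_current", "infection_current_ind_last"]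

def const_meds_feat : List String :=
  ["oral_contraceptives_ind_current", "progesterons_ind", "oral_contraceptives_ind_past"]

def const_gynec_feat : List String :=
  ["has_breastfed_ind", "children_ind", "children_cnt", "age_last_menstruation", "menopause_ind", "age_first_childbirth", "pregnancies_cnt", "pregnancies_ind", "age_first_menstruation", "menstruation_years", "menopause_dx_ind", "menarche_to_ftp_years"]

def const_prev_finding_feat : List String :=
  ["prev_high_risk_ind", "cancer_hist_any_ind", "prev_benign_cnt", "prev_benign_ind", "prev_high_risk_cnt"]

def const_genetic_feat : List String :=
  ["genetic_consult_ind"]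

def const_images : List String :=
  ["LCC_micro", "RCC_micro", "LMLO_micro", "RMLO_micro", "LCC_pred_classA", "LCC_pred_classB", "LCC_pred_classC", "LCC_pred_classD", "LCC_pred_classE", "RCC_pred_classA", "RCC_pred_classB", "RCC_pred_classC", "RCC_pred_classD", "RCC_pred_classE", "LMLO_pred_classA", "LMLO_pred_classB", "LMLO_pred_classC", "LMLO_pred_classD", "LMLO_pred_classE", "RMLO_pred_classA", "RMLO_pred_classB", "RMLO_pred_classC", "RMLO_pred_classD", "RMLO_pred_classE", "LCC_findings_size", "RCC_findings_size", "LMLO_findings_size", "RMLO_findings_size", "LCC_findings_x_max", "RCC_findings_x_max", "LMLO_findings_x_max", "RMLO_findings_x_max", "LCC_findings_y_max", "RCC_findings_y_max", "LMLO_findings_y_max", "RMLO_findings_y_max", "Calcification", "Breast Assymetry", "Tumor", "Architectural Distortion", "Axillary lymphadenopathy", "spiculated_lesions_report", "architectural_distortion_report", "suspicious_calcifications_report"]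

def const_dicom : List String :=
  ["DistanceSourceToPatient_AVG_CC", "DistanceSourceToDetector_AVG_CC", "XRayTubeCurrent_AVG_CC", "CompressionForce_AVG_CC", "ExposureTime_AVG_CC", "KVP_AVG_CC", "BodyPartThickness_AVG_CC", "RelativeXRayExposure_AVG_CC", "ExposureInuAs_AVG_CC", "DistanceSourceToPatient_AVG_MLO", "DistanceSourceToDetector_AVG_MLO", "XRayTubeCurrent_AVG_MLO", "CompressionForce_AVG_MLO", "ExposureTime_AVG_MLO", "KVP_AVG_MLO", "BodyPartThickness_AVG_MLO", "RelativeXRayExposure_AVG_MLO", "ExposureInuAs_AVG_MLO"]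
-- ===== PORT A =====
-- Every key is assigned exactly once, so the Python dict is this association
-- list in assignment order; each value is the comprehension/literal of A.
def tabular_feature_mg (data : List String) : List (String × List String) :=
  [ ("icd9_feat", data.filter (fun x => PySem.Str.startswith x "dx_")),
    ("labs_feat", data.filter (fun x => PySem.Str.startswith x "labs")),
    ("hrt_feat", data.filter (fun x => PySem.Str.startswith x "HRT")),
    ("outcome_feat", data.filter (fun x => PySem.Str.startswith x "outcome")),
    ("fam_feats", data.filter (fun x => PySem.Str.startswith x "family")),
    ("biopsy_feat", const_biopsy_feat),
    ("smoking_feat", data.filter (fun x => PySem.Str.startswith x "smoking")),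
    ("radio_feat", data.filter (fun x => PySem.Str.isIn "birads" x)
                 ++ data.filter (fun x => PySem.Str.isIn "breast_density" x)
                 ++ data.filter (fun x => PySem.Str.isIn "breast_MRI" x)),
    ("demo_feat", const_demo_feat),
    ("sympt_feat", const_sympt_feat),
    ("meds_feat", const_meds_feat),
    ("gynec_feat", const_gynec_feat),
    ("prev_finding_feat", const_prev_finding_feat),
    ("genetic_feat", const_genetic_feat),
    ("images", const_images),
    ("dicom", const_dicom) ]

-- ===== PORT B =====
structure Buckets where
  icd9 : List String
  labs : List String
  hrt : List String
  outcome : List String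
  fam : List String
  smoking : List String
  birads_b : List String
  density_b : List String
  mri_b : List String
deriving Repr, DecidableEq

-- the loop body of Source B: nine independent ifs, append on match
def bstep (b : Buckets) (x : String) : Buckets :=
  { icd9 := if PySem.Str.startswith x "dx_" then b.icd9 ++ [x] else b.icd9,
    labs := if PySem.Str.startswith x "labs" then b.labs ++ [x] else b.labs,
    hrt := if PySem.Str.startswith x "HRT" then b.hrt ++ [x] else b.hrt,
    outcome := if PySem.Str.startswith x "outcome" then b.outcome ++ [x] else b.outcome,
    fam := if PySem.Str.startswith x "family" then b.fam ++ [x] else b.fam,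
    smoking := if PySem.Str.startswith x "smoking" then b.smoking ++ [x] else b.smoking,
    birads_b := if PySem.Str.isIn "birads" x then b.birads_b ++ [x] else b.birads_b,
    density_b := if PySem.Str.isIn "breast_density" x then b.density_b ++ [x] else b.density_b,
    mri_b := if PySem.Str.isIn "breast_MRI" x then b.mri_b ++ [x] else b.mri_b }

def tabular_feature_mg_alt (data : List String) : List (String × List String) :=
  let b := data.foldl bstep ⟨[], [], [], [], [], [], [], [], []⟩
  [ ("icd9_feat", b.icd9),
    ("labs_feat", b.labs),
    ("hrt_feat", b.hrt),
    ("outcome_feat", b.outcome),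
    ("fam_feats", b.fam),
    ("biopsy_feat", const_biopsy_feat),
    ("smoking_feat", b.smoking),
    ("radio_feat", b.birads_b ++ b.density_b ++ b.mri_b),
    ("demo_feat", const_demo_feat),
    ("sympt_feat", const_sympt_feat),
    ("meds_feat", const_meds_feat),
    ("gynec_feat", const_gynec_feat),
    ("prev_finding_feat", const_prev_finding_feat),
    ("genetic_feat", const_genetic_feat),
    ("images", const_images),
    ("dicom", const_dicom) ]

-- ===== PRECONDITION & SPEC =====
def Spec_tabular_feature_mg (data : List String) (out : List (String × List String)) : Prop := out = tabular_feature_mg_alt data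
instance (data : List String) (out : List (String × List String)) : Decidable (Spec_tabular_feature_mg data out) := by unfold Spec_tabular_feature_mg; infer_instance

-- ===== CLAIM (what is proved, stated in full; the proofs are below) =====
def Claim_equal_tabular_feature_mg : Prop := ∀ (data : List String), Dom_tabular_feature_mg data → Spec_tabular_feature_mg data (tabular_feature_mg data)

-- ===== LEMMAS AND PROOFS =====
theorem foldl_bstep (data : List String) (b : Buckets) :
    data.foldl bstep b =
      ⟨b.icd9 ++ data.filter (fun x => PySem.Str.startswith x "dx_"),
       b.labs ++ data.filter (fun x => PySem.Str.startswith x "labs"),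
       b.hrt ++ data.filter (fun x => PySem.Str.startswith x "HRT"),
       b.outcome ++ data.filter (fun x => PySem.Str.startswith x "outcome"),
       b.fam ++ data.filter (fun x => PySem.Str.startswith x "family"),
       b.smoking ++ data.filter (fun x => PySem.Str.startswith x "smoking"),
       b.birads_b ++ data.filter (fun x => PySem.Str.isIn "birads" x),
       b.density_b ++ data.filter (fun x => PySem.Str.isIn "breast_density" x),
       b.mri_b ++ data.filter (fun x => PySem.Str.isIn "breast_MRI" x)⟩ := by
  induction data generalizing b with
  | nil => simp
  | cons x xs ih =>
    simp only [List.foldl_cons, ih, List.filter_cons, bstep]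
    simp only [Buckets.mk.injEq]
    refine ⟨?_, ?_, ?_, ?_, ?_, ?_, ?_, ?_, ?_⟩ <;> split <;> simp

-- ===== VERDICT (by name: the statement is the Claim_ definition above) =====
theorem tabular_feature_mg_spec : Claim_equal_tabular_feature_mg := by
  intro data _
  unfold Spec_tabular_feature_mg tabular_feature_mg tabular_feature_mg_alt
  simp [foldl_bstep]
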